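-- pv_equiv track=rewrite | github.com/kkr010128/codebert | problem267/problem267_108.py | snx
-- ===== SOURCE A (Python) =====
-- def snx(s, target=None, reverse=False, loop=False):
--     """文字列sの各要素について、cがiより→で最初に現れる位置n[i][c]
--     loop=Trueのとき周回した先のインデックスまで求める
--     """
--     if target is None:
--         target = [chr(v) for v in range(ord("a"), ord("z")+1)]
--     d = {c:None for c in target}
--     nx = [[None]*len(target) for _ in range(len(s))]
--     if not reverse:
--         i = len(s)-1
--         for c in reversed(s):
--             d[c] = i
--             for j,t in enumerate(target):
--                 nx[i][j] = d[t]
--             i -= 1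
--         if loop:
--             for i in range(len(s)):
--                 for j in range(len(target)):
--                     if nx[i][j] is None:
--                         nx[i][j] = nx[0][j]
--     else:
--         i = 0
--         for c in s:
--             d[c] = i
--             for j,t in enumerate(target):
--                 nx[i][j] = d[t]
--             i += 1
--         if loop:
--             for i in range(len(s)):
--                 for j in range(len(target)):
--                     if nx[i][j] is None:
--                         nx[i][j] = nx[-1][j]
--     return nx
-- ===== SOURCE B (Python) =====
-- def snx(s, target=None, reverse=False, loop=False):
--     if target is None:
--         target = [chr(v) for v in range(ord("a"), ord("z") + 1)]
--     n = len(s)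
--     if not target:
--         return [[] for _ in range(n)]
--     cols = []
--     for t in target:
--         col = [None] * n
--         nxt = None
--         for i in (range(n) if reverse else range(n - 1, -1, -1)):
--             if s[i] == t:
--                 nxt = i
--             col[i] = nxt
--         cols.append(col)
--     nx = [list(r) for r in zip(*cols)]
--     if loop and n:
--         base = nx[-1] if reverse else nx[0]
--         nx = [[b if v is None else v for v, b in zip(row, base)] for row in nx]
--     return nx
-- ===== Notes on version B (the rewrite author's own statement) =====
-- stated objective: alternative
-- what changed: Replaces the dict-plus-row-snapshot scan with independent per-target column scans (a running 'next occurrence' accumulator per target), then a zip-transpose into rows and a column-wise wrap fill for loop=True.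
import Mathlib
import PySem

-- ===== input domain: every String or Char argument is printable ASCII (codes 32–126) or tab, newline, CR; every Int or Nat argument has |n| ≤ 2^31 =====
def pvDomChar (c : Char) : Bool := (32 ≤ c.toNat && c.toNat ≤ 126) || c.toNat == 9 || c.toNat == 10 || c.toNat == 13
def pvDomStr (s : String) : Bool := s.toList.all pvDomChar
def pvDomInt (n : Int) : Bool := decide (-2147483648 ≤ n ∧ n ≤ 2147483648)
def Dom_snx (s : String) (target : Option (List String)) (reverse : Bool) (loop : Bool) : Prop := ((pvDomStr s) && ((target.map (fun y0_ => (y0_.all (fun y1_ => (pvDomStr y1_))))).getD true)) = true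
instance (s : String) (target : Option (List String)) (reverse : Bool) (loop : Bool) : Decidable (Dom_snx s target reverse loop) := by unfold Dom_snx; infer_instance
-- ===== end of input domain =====

-- B replaces A's dict-with-row-snapshots table build by independent per-target column
-- scans with a running accumulator, then a transpose; same value on every input (A is total).

-- ===== PORT A =====
-- default target [chr(v) for v in range(ord('a'), ord('z')+1)]
def snxDefaultTarget : List String :=
  (PySem.List.pyRange 97 123 1).map (fun v => String.ofList [Char.ofNat v.toNat])

-- the fill 'if nx[i][j] is None: nx[i][j] = base[j]' over one row (each row has len(target) cells)
def snxFill (base : List (Option Int)) (row : List (Option Int)) : List (Option Int) :=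
  List.zipWith (fun v b => if v = none then b else v) row base

-- 'for c in reversed(s)' with i counting down: the suffix is processed first with the incoming
-- dict, then d[c] = i is set and row i ('[d[t] for t in target]') is prepended.
def snxPairRev (tg : List String) :
    List Char → Int → PySem.Dict String (Option Int) →
      PySem.Dict String (Option Int) × List (List (Option Int))
  | [], _, d => (d, [])
  | c :: rest, i, d =>
    let p := snxPairRev tg rest (i + 1) d
    let d2 := p.1.insert (String.ofList [c]) (some i)
    (d2, tg.map (fun t => d2.getD t none) :: p.2)

-- 'for c in s' with i counting up: d[c] = i, row i appended, dict threaded forward.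
def snxPairFwd (tg : List String) :
    List Char → Int → PySem.Dict String (Option Int) →
      PySem.Dict String (Option Int) × List (List (Option Int))
  | [], _, d => (d, [])
  | c :: rest, i, d =>
    let d1 := d.insert (String.ofList [c]) (some i)
    let p := snxPairFwd tg rest (i + 1) d1
    (p.1, tg.map (fun t => d1.getD t none) :: p.2)

def snx (s : String) (target : Option (List String)) (reverse : Bool) (loop : Bool) :
    List (List (Option Int)) :=
  let tg := target.getD snxDefaultTarget
  let d0 := tg.foldl (fun d t => d.insert t (none : Option Int)) PySem.Dict.empty
  let chars := s.toList
  if reverse = false then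
    let nx := (snxPairRev tg chars 0 d0).2
    if loop then nx.map (snxFill (nx.getD 0 [])) else nx
  else
    let nx := (snxPairFwd tg chars 0 d0).2
    if loop then nx.map (snxFill (nx.getLastD [])) else nx

-- ===== PORT B =====
-- one column: scan right-to-left keeping the running next-occurrence accumulator
def snxColRev (t : String) : List Char → Int → List (Option Int) × Option Int
  | [], _ => ([], none)
  | c :: rest, i =>
    let p := snxColRev t rest (i + 1)
    let nxt' := if String.ofList [c] = t then some i else p.2
    (nxt' :: p.1, nxt')

-- one column for reverse=True: scan left-to-right, accumulator threaded forward
def snxColFwd (t : String) : List Char → Int → Option Int → List (Option Int) × Option Int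
  | [], _, nxt => ([], nxt)
  | c :: rest, i, nxt =>
    let nxt' := if String.ofList [c] = t then some i else nxt
    let p := snxColFwd t rest (i + 1) nxt'
    (nxt' :: p.1, p.2)

-- zip(*cols): rows from equal-length columns
def snxTranspose : List (List (Option Int)) → List (List (Option Int))
  | [] => []
  | [] :: _ => []
  | (v :: vt) :: cs =>
      (v :: cs.map (fun col => col.headD none)) ::
        snxTranspose (vt :: cs.map (fun col => col.tail))
termination_by cols => (cols.headD []).length
decreasing_by simp

def snx_alt (s : String) (target : Option (List String)) (reverse : Bool) (loop : Bool) :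
    List (List (Option Int)) :=
  let tg := target.getD snxDefaultTarget
  let chars := s.toList
  if tg.isEmpty then chars.map (fun _ => ([] : List (Option Int)))
  else
    let cols := tg.map (fun t =>
      if reverse then (snxColFwd t chars 0 none).1 else (snxColRev t chars 0).1)
    let nx := snxTranspose cols
    if loop && !chars.isEmpty then
      nx.map (snxFill (if reverse then nx.getLastD [] else nx.getD 0 []))
    else nx

-- ===== PRECONDITION & SPEC =====
def Spec_snx (s : String) (target : Option (List String)) (reverse : Bool) (loop : Bool) (out : List (List (Option Int))) : Prop := out = snx_alt s target reverse loop
instance (s : String) (target : Option (List String)) (reverse : Bool) (loop : Bool) (out : List (List (Option Int))) : Decidable (Spec_snx s target reverse loop out) := by unfold Spec_snx; infer_instance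

-- ===== CLAIM (what is proved, stated in full; the proofs are below) =====
def Claim_equal_snx : Prop := ∀ (s : String) (target : Option (List String)) (reverse : Bool) (loop : Bool), Dom_snx s target reverse loop → Spec_snx s target reverse loop (snx s target reverse loop)

-- ===== LEMMAS AND PROOFS =====

theorem getD_foldl_none (l : List String) (d : PySem.Dict String (Option Int))
    (h : ∀ k, d.getD k none = none) :
    ∀ k, (l.foldl (fun d t => d.insert t (none : Option Int)) d).getD k none = none := by
  induction l generalizing d with
  | nil => exact h
  | cons t l ih =>
    intro k
    simp only [List.foldl_cons]
    refine ih _ (fun k => ?_) k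
    rw [PySem.Dict.getD_insert]
    split_ifs with hk
    · rfl
    · exact h k

theorem snxInsert_getD (d : PySem.Dict String (Option Int)) (c : Char) (i : Int) (t : String) :
    (d.insert (String.ofList [c]) (some i)).getD t none
      = if String.ofList [c] = t then some i else d.getD t none := by
  rw [PySem.Dict.getD_insert]
  rcases eq_or_ne (String.ofList [c]) t with h | h
  · simp [h]
  · simp [h, Ne.symm h]

theorem snxPairRev_nil (chars : List Char) : ∀ (i : Int) (d : PySem.Dict String (Option Int)),
    (snxPairRev [] chars i d).2 = chars.map (fun _ => ([] : List (Option Int))) := by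
  induction chars with
  | nil => intro i d; rfl
  | cons c rest ih => intro i d; simp [snxPairRev, ih]

theorem snxPairFwd_nil (chars : List Char) : ∀ (i : Int) (d : PySem.Dict String (Option Int)),
    (snxPairFwd [] chars i d).2 = chars.map (fun _ => ([] : List (Option Int))) := by
  induction chars with
  | nil => intro i d; rfl
  | cons c rest ih => intro i d; simp [snxPairFwd, ih]

theorem snxPairRev_dict (tg : List String) (t : String) (chars : List Char) :
    ∀ (i : Int) (d : PySem.Dict String (Option Int)),
    ((snxPairRev tg chars i d).1).getD t none
      = ((snxColRev t chars i).2).or (d.getD t none) := by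
  induction chars with
  | nil => intro i d; simp [snxPairRev, snxColRev]
  | cons c rest ih =>
    intro i d
    simp only [snxPairRev, snxColRev, snxInsert_getD, ih]
    rcases eq_or_ne (String.ofList [c]) t with h | h
    · simp [h]
    · simp [h]

theorem snxColRev_cons (t : String) (c : Char) (rest : List Char) (i : Int) :
    (snxColRev t (c :: rest) i).1
      = (snxColRev t (c :: rest) i).2 :: (snxColRev t rest (i + 1)).1 := rfl

theorem snxRowsRev (t0 : String) (tg' : List String) (chars : List Char) :
    ∀ (i : Int) (d : PySem.Dict String (Option Int)),
    (∀ t ∈ t0 :: tg', d.getD t none = none) →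
    (snxPairRev (t0 :: tg') chars i d).2
      = snxTranspose ((t0 :: tg').map (fun t => (snxColRev t chars i).1)) := by
  induction chars with
  | nil => intro i d _; simp [snxPairRev, snxColRev, snxTranspose]
  | cons c rest ih =>
    intro i d hd
    have hrow : ∀ t ∈ t0 :: tg',
        ((snxPairRev (t0 :: tg') rest (i + 1) d).1.insert (String.ofList [c]) (some i)).getD t none
          = (snxColRev t (c :: rest) i).2 := by
      intro t ht
      rw [snxInsert_getD, snxPairRev_dict, hd t ht]
      simp [snxColRev]
    have htail : ((t0 :: tg').map (fun t => (snxColRev t (c :: rest) i).1))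
        = ((snxColRev t0 (c :: rest) i).2 :: (snxColRev t0 rest (i + 1)).1)
          :: tg'.map (fun t => (snxColRev t (c :: rest) i).1) := by
      simp [snxColRev_cons]
    rw [htail, snxTranspose]
    simp only [snxPairRev]
    rw [List.cons.injEq]
    refine ⟨?_, ?_⟩
    · -- head rows agree
      rw [List.map_map, List.map_cons, List.cons.injEq]
      refine ⟨(hrow t0 (by simp)).trans ?_, ?_⟩
      · rfl
      · calc tg'.map (fun t => ((snxPairRev (t0 :: tg') rest (i + 1) d).1.insert (String.ofList [c]) (some i)).getD t none)
            = tg'.map (fun t => (snxColRev t (c :: rest) i).2) :=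
              List.map_congr_left (fun t ht => hrow t (by simp [ht]))
          _ = tg'.map ((fun col => col.headD none) ∘ (fun t => (snxColRev t (c :: rest) i).1)) := by
              refine List.map_congr_left (fun t _ => ?_)
              simp [snxColRev_cons]
    · -- tails: apply IH
      have : (snxColRev t0 rest (i + 1)).1
            :: (tg'.map (fun t => (snxColRev t (c :: rest) i).1)).map (fun col => col.tail)
          = (t0 :: tg').map (fun t => (snxColRev t rest (i + 1)).1) := by
        simp only [List.map_map, List.map_cons, List.cons.injEq]
        refine ⟨trivial, List.map_congr_left (fun t _ => ?_)⟩
        simp [snxColRev_cons]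
      rw [this, ih (i + 1) d hd]

theorem snxRowsFwd (t0 : String) (tg' : List String) (chars : List Char) :
    ∀ (i : Int) (d : PySem.Dict String (Option Int)),
    (snxPairFwd (t0 :: tg') chars i d).2
      = snxTranspose ((t0 :: tg').map (fun t => (snxColFwd t chars i (d.getD t none)).1)) := by
  induction chars with
  | nil => intro i d; simp [snxPairFwd, snxColFwd, snxTranspose]
  | cons c rest ih =>
    intro i d
    have hstep : ∀ t, (d.insert (String.ofList [c]) (some i)).getD t none
        = (if String.ofList [c] = t then some i else d.getD t none) := fun t => snxInsert_getD d c i t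
    have hcol : ∀ t, (snxColFwd t (c :: rest) i (d.getD t none)).1
        = ((d.insert (String.ofList [c]) (some i)).getD t none)
          :: (snxColFwd t rest (i + 1) ((d.insert (String.ofList [c]) (some i)).getD t none)).1 := by
      intro t; rw [hstep t]; rfl
    have htail : ((t0 :: tg').map (fun t => (snxColFwd t (c :: rest) i (d.getD t none)).1))
        = (((d.insert (String.ofList [c]) (some i)).getD t0 none)
            :: (snxColFwd t0 rest (i + 1) ((d.insert (String.ofList [c]) (some i)).getD t0 none)).1)
          :: tg'.map (fun t => (snxColFwd t (c :: rest) i (d.getD t none)).1) := by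
      simp only [List.map_cons, hcol t0]
    rw [htail, snxTranspose]
    simp only [snxPairFwd]
    rw [List.cons.injEq]
    refine ⟨?_, ?_⟩
    · rw [List.map_map, List.map_cons, List.cons.injEq]
      refine ⟨rfl, List.map_congr_left (fun t _ => ?_)⟩
      simp [hcol t]
    · have : (snxColFwd t0 rest (i + 1) ((d.insert (String.ofList [c]) (some i)).getD t0 none)).1
            :: (tg'.map (fun t => (snxColFwd t (c :: rest) i (d.getD t none)).1)).map
                 (fun col => col.tail)
          = (t0 :: tg').map
              (fun t => (snxColFwd t rest (i + 1)
                ((d.insert (String.ofList [c]) (some i)).getD t none)).1) := by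
        simp only [List.map_map, List.map_cons, List.cons.injEq]
        refine ⟨trivial, List.map_congr_left (fun t _ => ?_)⟩
        simp [hcol t]
      rw [this, ih (i + 1) (d.insert (String.ofList [c]) (some i))]

theorem snx_eq (s : String) (target : Option (List String)) (reverse : Bool) (loop : Bool) :
    snx s target reverse loop = snx_alt s target reverse loop := by
  unfold snx snx_alt
  cases htg : target.getD snxDefaultTarget with
  | nil =>
    cases reverse <;> cases loop <;>
      simp [snxPairRev_nil, snxPairFwd_nil, snxFill]
  | cons t0 tg' =>
    have hd0 : ∀ t ∈ t0 :: tg',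
        ((t0 :: tg').foldl (fun d t => d.insert t (none : Option Int))
          PySem.Dict.empty).getD t none = none := by
      intro t _
      exact getD_foldl_none _ _ (fun k => by simp [PySem.Dict.getD_empty]) t
    have hrev : (snxPairRev (t0 :: tg') s.toList 0
          ((t0 :: tg').foldl (fun d t => d.insert t (none : Option Int)) PySem.Dict.empty)).2
        = snxTranspose ((t0 :: tg').map (fun t => (snxColRev t s.toList 0).1)) :=
      snxRowsRev t0 tg' s.toList 0 _ hd0
    have hfwd : (snxPairFwd (t0 :: tg') s.toList 0
          ((t0 :: tg').foldl (fun d t => d.insert t (none : Option Int)) PySem.Dict.empty)).2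
        = snxTranspose ((t0 :: tg').map (fun t => (snxColFwd t s.toList 0 none).1)) := by
      rw [snxRowsFwd]
      congr 1
      exact List.map_congr_left (fun t ht => by rw [hd0 t ht])
    cases hc : s.toList with
    | nil =>
      cases reverse <;> cases loop <;>
        simp_all [snxPairRev, snxPairFwd, snxColRev, snxColFwd, snxTranspose]
    | cons c cs =>
      cases reverse <;> cases loop <;>
        simp_all
  -- done

-- ===== VERDICT (by name: the statement is the Claim_ definition above) =====
theorem snx_spec : Claim_equal_snx := by
  intro s target reverse loop _
  unfold Spec_snx
  exact snx_eq s target reverse loop
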